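-- pv_equiv track=rewrite | github.com/yaeba/binary-search-solutions | solutions/Contiguously-Increasing-Numbers.py | solve
-- ===== SOURCE A (Python) =====
-- def solve(start, end):
--     res = []
--     queue = [x for x in range(1, 10)]
--     for num in queue:
--         if start <= num <= end:
--             res.append(num)
--         elif num > end:
--             break
--
--         last_digit = num % 10
--         if last_digit != 9:
--             queue.append(num * 10 + last_digit + 1)
--
--     return res
-- ===== SOURCE B (Python) =====
-- def solve(start, end):
--     nums = []
--     for d in range(1, 10):
--         num = 0
--         for nd in range(d, 10):
--             num = num * 10 + nd
--             nums.append(num)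
--     nums.sort()
--     return [x for x in nums if start <= x <= end]
-- ===== Notes on version B (the rewrite author's own statement) =====
-- stated objective: simpler
-- what changed: Replaces the self-extending BFS queue with early break by a direct double-loop enumeration of all 45 contiguously-increasing-digit numbers, sorted then filtered to [start,end].
import Mathlib
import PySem

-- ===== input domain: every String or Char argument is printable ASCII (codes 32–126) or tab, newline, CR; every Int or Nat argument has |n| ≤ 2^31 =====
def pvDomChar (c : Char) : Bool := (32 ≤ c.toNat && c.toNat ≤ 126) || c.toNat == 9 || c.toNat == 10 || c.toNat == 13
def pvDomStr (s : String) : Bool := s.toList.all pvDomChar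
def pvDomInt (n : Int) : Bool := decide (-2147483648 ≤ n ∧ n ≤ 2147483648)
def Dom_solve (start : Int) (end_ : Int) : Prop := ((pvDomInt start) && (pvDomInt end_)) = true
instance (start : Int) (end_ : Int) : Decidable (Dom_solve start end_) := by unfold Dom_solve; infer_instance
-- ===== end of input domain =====

-- B replaces A's self-extending BFS queue (with early break) by a direct double-loop
-- enumeration of the 45 contiguously-increasing-digit numbers, sorted then filtered (simpler).

-- ===== PORT A =====
-- extension step of A's loop: queue.append(num*10 + last_digit + 1) when last digit ≠ 9
def aExt (num : Int) : List Int :=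
  if PySem.Int.mod num 10 ≠ 9 then [num * 10 + PySem.Int.mod num 10 + 1] else []

-- A iterates by index over a list it appends to; ported as a worklist on the unprocessed
-- suffix (appends go to the back), with a fuel guard for totality (the queue never exceeds
-- 45 elements, so fuel 100 is never exhausted).
def loopA (start end_ : Int) : Nat → List Int → List Int → List Int
  | 0, _, res => res
  | Nat.succ f, pending, res =>
    match pending with
    | [] => res
    | num :: rest =>
      if start ≤ num ∧ num ≤ end_ then
        loopA start end_ f (rest ++ aExt num) (res ++ [num])
      else if num > end_ then res
      else loopA start end_ f (rest ++ aExt num) res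

def solve (start : Int) (end_ : Int) : List Int :=
  loopA start end_ 100 (PySem.List.pyRange 1 10 1) []

-- ===== PORT B =====
-- B's double loop building all prefixes d, d(d+1), … for each start digit d
def bNums : List Int :=
  (PySem.List.pyRange 1 10 1).foldl (fun acc d =>
    ((PySem.List.pyRange d 10 1).foldl
      (fun (st : List Int × Int) nd => (st.1 ++ [st.2 * 10 + nd], st.2 * 10 + nd))
      (acc, 0)).1) []

def solve_alt (start : Int) (end_ : Int) : List Int :=
  (PySem.List.sorted bNums (fun x => x) false).filter (fun x => decide (start ≤ x ∧ x ≤ end_))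

-- ===== PRECONDITION & SPEC =====
def Spec_solve (start : Int) (end_ : Int) (out : List Int) : Prop := out = solve_alt start end_
instance (start : Int) (end_ : Int) (out : List Int) : Decidable (Spec_solve start end_ out) := by unfold Spec_solve; infer_instance

-- ===== CLAIM (what is proved, stated in full; the proofs are below) =====
def Claim_equal_solve : Prop := ∀ (start : Int) (end_ : Int), Dom_solve start end_ → Spec_solve start end_ (solve start end_)

-- ===== LEMMAS AND PROOFS =====

-- the 45 contiguously-increasing-digit numbers, ascending
def L45 : List Int :=
  [1, 2, 3, 4, 5, 6, 7, 8, 9,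
   12, 23, 34, 45, 56, 67, 78, 89,
   123, 234, 345, 456, 567, 678, 789,
   1234, 2345, 3456, 4567, 5678, 6789,
   12345, 23456, 34567, 45678, 56789,
   123456, 234567, 345678, 456789,
   1234567, 2345678, 3456789,
   12345678, 23456789,
   123456789]

-- the sequence of numbers A's loop would visit with no break
def seqA : Nat → List Int → List Int
  | 0, _ => []
  | Nat.succ _, [] => []
  | Nat.succ f, n :: rest => n :: seqA f (rest ++ aExt n)

-- what A's loop body does to a fixed visiting sequence
def gA (start end_ : Int) : List Int → List Int
  | [] => []
  | n :: t =>
    if start ≤ n ∧ n ≤ end_ then n :: gA start end_ t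
    else if n > end_ then []
    else gA start end_ t

theorem loopA_eq_gA (start end_ : Int) :
    ∀ (f : Nat) (P res : List Int),
      loopA start end_ f P res = res ++ gA start end_ (seqA f P) := by
  intro f
  induction f with
  | zero => intro P res; simp [loopA, seqA, gA]
  | succ f ih =>
    intro P res
    match P with
    | [] => simp [loopA, seqA, gA]
    | n :: rest =>
      simp only [loopA, seqA, gA]
      by_cases h1 : start ≤ n ∧ n ≤ end_
      · simp [h1, ih]
      · by_cases h2 : n > end_
        · simp [h1, h2]
        · simp [h1, h2, ih]

theorem seq_eval : seqA 100 (PySem.List.pyRange 1 10 1) = L45 := by decide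

theorem gA_eq_filter (start end_ : Int) :
    ∀ (L : List Int), L.Pairwise (· < ·) →
      gA start end_ L = L.filter (fun n => decide (start ≤ n ∧ n ≤ end_)) := by
  intro L
  induction L with
  | nil => intro _; simp [gA]
  | cons n t ih =>
    intro hp
    rw [List.pairwise_cons] at hp
    obtain ⟨hlt, hpt⟩ := hp
    by_cases h1 : start ≤ n ∧ n ≤ end_
    · simp [gA, h1, ih hpt]
    · by_cases h2 : n > end_
      · have hnil : t.filter (fun n => decide (start ≤ n ∧ n ≤ end_)) = [] := by
          rw [List.filter_eq_nil_iff]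
          intro m hm
          have := hlt m hm
          simp only [decide_eq_true_eq, not_and]
          intro _
          omega
        simp only [gA, if_neg h1, if_pos h2, List.filter_cons, decide_eq_true_eq]
        exact hnil.symm
      · simp [gA, h1, h2, ih hpt]

theorem L45_pairwise : L45.Pairwise (· < ·) := by decide

theorem sorted_bNums : PySem.List.sorted bNums (fun x => x) false = L45 := by decide

-- ===== VERDICT (by name: the statement is the Claim_ definition above) =====
theorem solve_spec : Claim_equal_solve := by
  intro start end_ _
  unfold Spec_solve solve solve_alt
  rw [loopA_eq_gA, seq_eval, sorted_bNums, gA_eq_filter start end_ L45 L45_pairwise]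
  simp
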